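-- pv_equiv track=rewrite | github.com/GaneshGupta3/irs_implementation | frontend/src/example.py | parse_disease_document
-- ===== SOURCE A (Python) =====
-- def parse_disease_document(doc):
--     """Parse structured disease information from document"""
--     info = {
--         'name': '',
--         'prevalence': '',
--         'risk_factors': '',
--         'symptoms': '',
--         'treatments': '',
--         'preventive_measures': ''
--     }
--
--     for line in doc.split('\n'):
--         if line.startswith('Disease Name:'):
--             info['name'] = line.split(':', 1)[1].strip()
--         elif line.startswith('Prevalence:'):
--             info['prevalence'] = line.split(':', 1)[1].strip()
--         elif line.startswith('Risk Factors:'):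
--             info['risk_factors'] = line.split(':', 1)[1].strip()
--         elif line.startswith('Symptoms:'):
--             info['symptoms'] = line.split(':', 1)[1].strip()
--         elif line.startswith('Treatments:'):
--             info['treatments'] = line.split(':', 1)[1].strip()
--         elif line.startswith('Preventive Measures:'):
--             info['preventive_measures'] = line.split(':', 1)[1].strip()
--
--     return info
-- ===== SOURCE B (Python) =====
-- _FIELDS = [
--     ('name', 'Disease Name:'),
--     ('prevalence', 'Prevalence:'),
--     ('risk_factors', 'Risk Factors:'),
--     ('symptoms', 'Symptoms:'),
--     ('treatments', 'Treatments:'),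
--     ('preventive_measures', 'Preventive Measures:'),
-- ]
--
-- def _last_value(lines, prefix):
--     """Value of the last line carrying this label, or '' if absent."""
--     for line in reversed(lines):
--         if line.startswith(prefix):
--             return line.split(':', 1)[1].strip()
--     return ''
--
-- def parse_disease_document(doc):
--     """Parse structured disease information from document (field-major version)"""
--     lines = doc.split('\n')
--     return {key: _last_value(lines, prefix) for key, prefix in _FIELDS}
-- ===== Notes on version B (the rewrite author's own statement) =====
-- stated objective: alternative
-- what changed: A makes one line-major pass mutating a dict via six if/elif branches; B is field-major: for each of the six fields it independently scans the lines in reverse for the last line with that label, building the result dict in one comprehension with no mutation.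
import Mathlib
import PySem

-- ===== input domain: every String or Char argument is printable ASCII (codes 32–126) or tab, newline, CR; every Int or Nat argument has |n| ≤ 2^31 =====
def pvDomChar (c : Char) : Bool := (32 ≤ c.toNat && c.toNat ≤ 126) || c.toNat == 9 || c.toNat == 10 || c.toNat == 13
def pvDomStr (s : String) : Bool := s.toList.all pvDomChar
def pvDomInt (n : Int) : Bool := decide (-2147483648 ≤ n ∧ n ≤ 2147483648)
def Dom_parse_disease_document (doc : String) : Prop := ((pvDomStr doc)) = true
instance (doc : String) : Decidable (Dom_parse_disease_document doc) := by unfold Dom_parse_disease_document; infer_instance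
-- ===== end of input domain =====

-- B is field-major instead of line-major: for each field it scans the lines in reverse for the
-- last matching label (no mutable dict, no branch chain); same return value, similar cost.

-- value of a labelled line: line.split(':', 1)[1].strip()  (both Pythons contain this expression)
def pdVal (line : String) : String :=
  PySem.Str.strip (PySem.List.pyGetD ((PySem.Str.splitMax? line ":" 1).getD []) 1 "")

-- ===== PORT A =====
-- one iteration of A's for-loop: the six startswith if/elif branches
def pdStepA (info : PySem.Dict String String) (line : String) : PySem.Dict String String :=
  if PySem.Str.startswith line "Disease Name:" then info.insert "name" (pdVal line)
  else if PySem.Str.startswith line "Prevalence:" then info.insert "prevalence" (pdVal line)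
  else if PySem.Str.startswith line "Risk Factors:" then info.insert "risk_factors" (pdVal line)
  else if PySem.Str.startswith line "Symptoms:" then info.insert "symptoms" (pdVal line)
  else if PySem.Str.startswith line "Treatments:" then info.insert "treatments" (pdVal line)
  else if PySem.Str.startswith line "Preventive Measures:" then info.insert "preventive_measures" (pdVal line)
  else info

def parse_disease_document (doc : String) : List (String × String) :=
  let info : PySem.Dict String String := PySem.Dict.ofList
    [("name", ""), ("prevalence", ""), ("risk_factors", ""), ("symptoms", ""),
     ("treatments", ""), ("preventive_measures", "")]
  (((PySem.Str.split? doc "\n").getD []).foldl pdStepA info).items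

-- ===== PORT B =====
-- B's constant _FIELDS table: (dict key, colon-terminated label prefix)
def pdFields : List (String × String) :=
  [("name", "Disease Name:"), ("prevalence", "Prevalence:"), ("risk_factors", "Risk Factors:"),
   ("symptoms", "Symptoms:"), ("treatments", "Treatments:"), ("preventive_measures", "Preventive Measures:")]

-- B's _last_value: first match over reversed(lines), default ''
def pdLast (lines : List String) (pre : String) : String :=
  match lines.reverse.find? (fun l => PySem.Str.startswith l pre) with
  | some l => pdVal l
  | none => ""

-- the dict comprehension over _FIELDS (distinct keys, insertion order = pdFields order)
def parse_disease_document_alt (doc : String) : List (String × String) :=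
  let lines := (PySem.Str.split? doc "\n").getD []
  pdFields.map (fun kp => (kp.1, pdLast lines kp.2))

-- ===== PRECONDITION & SPEC =====
def Spec_parse_disease_document (doc : String) (out : List (String × String)) : Prop := out = parse_disease_document_alt doc
instance (doc : String) (out : List (String × String)) : Decidable (Spec_parse_disease_document doc out) := by unfold Spec_parse_disease_document; infer_instance

-- ===== CLAIM (what is proved, stated in full; the proofs are below) =====
def Claim_equal_parse_disease_document : Prop := ∀ (doc : String), Dom_parse_disease_document doc → Spec_parse_disease_document doc (parse_disease_document doc)

-- ===== LEMMAS AND PROOFS =====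

-- A's running value for one field: fold the "overwrite if the label matches" update forward
def pdAcc (p : String) (v : String) (lines : List String) : String :=
  lines.foldl (fun acc line => if PySem.Str.startswith line p then pdVal line else acc) v

theorem pd_acc_eq_last (lines : List String) (p : String) : ∀ (v : String),
    pdAcc p v lines =
      (match lines.reverse.find? (fun l => PySem.Str.startswith l p) with
       | some l => pdVal l
       | none => v) := by
  induction lines with
  | nil => intro v; rfl
  | cons x xs ih =>
      intro v
      have h : pdAcc p v (x :: xs) = pdAcc p (if PySem.Str.startswith x p then pdVal x else v) xs := rfl
      rw [h, ih]
      simp only [List.reverse_cons, List.find?_append]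
      cases hf : xs.reverse.find? (fun l => PySem.Str.startswith l p) with
      | some l => simp
      | none =>
          by_cases hx : PySem.Str.startswith x p
          all_goals (rw [PySem.Str.startswith] at hx; simp [List.find?, hx])

-- two labels, neither a prefix of the other, cannot both start the same line
theorem pd_excl {line p q : String} (hp : ¬ p.toList <+: q.toList) (hq : ¬ q.toList <+: p.toList)
    (h : PySem.Str.startswith line p = true) : PySem.Str.startswith line q = false := by
  rw [PySem.Str.startswith, PySem.Chars.startswith] at h ⊢
  cases hc : q.toList.isPrefixOf line.toList with
  | false => rfl
  | true =>
      have h1 : p.toList <+: line.toList := List.isPrefixOf_iff_prefix.mp h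
      have h2 : q.toList <+: line.toList := List.isPrefixOf_iff_prefix.mp hc
      rcases (List.prefix_or_prefix_of_prefix h1 h2) with hh | hh
      · exact absurd hh hp
      · exact absurd hh hq

-- one step of A's loop on the six-key dict, expressed field by field
theorem pd_step (v1 v2 v3 v4 v5 v6 line : String) :
    pdStepA (PySem.Dict.mk [("name", v1), ("prevalence", v2), ("risk_factors", v3),
      ("symptoms", v4), ("treatments", v5), ("preventive_measures", v6)]) line =
    PySem.Dict.mk
      [("name", if PySem.Str.startswith line "Disease Name:" then pdVal line else v1),
       ("prevalence", if PySem.Str.startswith line "Prevalence:" then pdVal line else v2),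
       ("risk_factors", if PySem.Str.startswith line "Risk Factors:" then pdVal line else v3),
       ("symptoms", if PySem.Str.startswith line "Symptoms:" then pdVal line else v4),
       ("treatments", if PySem.Str.startswith line "Treatments:" then pdVal line else v5),
       ("preventive_measures", if PySem.Str.startswith line "Preventive Measures:" then pdVal line else v6)] := by
  by_cases h1 : PySem.Str.startswith line "Disease Name:"
  · have e2 := pd_excl (by decide) (by decide) h1 (q := "Prevalence:")
    have e3 := pd_excl (by decide) (by decide) h1 (q := "Risk Factors:")
    have e4 := pd_excl (by decide) (by decide) h1 (q := "Symptoms:")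
    have e5 := pd_excl (by decide) (by decide) h1 (q := "Treatments:")
    have e6 := pd_excl (by decide) (by decide) h1 (q := "Preventive Measures:")
    simp only [pdStepA, h1, e2, e3, e4, e5, e6, if_true, Bool.false_eq_true, if_false]
    apply PySem.Dict.ext
    rw [PySem.Dict.items_insert_of_contains]
    · simp
    · simp [PySem.Dict.contains_mk]
  by_cases h2 : PySem.Str.startswith line "Prevalence:"
  · have e3 := pd_excl (by decide) (by decide) h2 (q := "Risk Factors:")
    have e4 := pd_excl (by decide) (by decide) h2 (q := "Symptoms:")
    have e5 := pd_excl (by decide) (by decide) h2 (q := "Treatments:")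
    have e6 := pd_excl (by decide) (by decide) h2 (q := "Preventive Measures:")
    simp only [pdStepA, h1, h2, e3, e4, e5, e6, if_true, Bool.false_eq_true, if_false]
    apply PySem.Dict.ext
    rw [PySem.Dict.items_insert_of_contains]
    · simp
    · simp [PySem.Dict.contains_mk]
  by_cases h3 : PySem.Str.startswith line "Risk Factors:"
  · have e4 := pd_excl (by decide) (by decide) h3 (q := "Symptoms:")
    have e5 := pd_excl (by decide) (by decide) h3 (q := "Treatments:")
    have e6 := pd_excl (by decide) (by decide) h3 (q := "Preventive Measures:")
    simp only [pdStepA, h1, h2, h3, e4, e5, e6, if_true, Bool.false_eq_true, if_false]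
    apply PySem.Dict.ext
    rw [PySem.Dict.items_insert_of_contains]
    · simp
    · simp [PySem.Dict.contains_mk]
  by_cases h4 : PySem.Str.startswith line "Symptoms:"
  · have e5 := pd_excl (by decide) (by decide) h4 (q := "Treatments:")
    have e6 := pd_excl (by decide) (by decide) h4 (q := "Preventive Measures:")
    simp only [pdStepA, h1, h2, h3, h4, e5, e6, if_true, Bool.false_eq_true, if_false]
    apply PySem.Dict.ext
    rw [PySem.Dict.items_insert_of_contains]
    · simp
    · simp [PySem.Dict.contains_mk]
  by_cases h5 : PySem.Str.startswith line "Treatments:"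
  · have e6 := pd_excl (by decide) (by decide) h5 (q := "Preventive Measures:")
    simp only [pdStepA, h1, h2, h3, h4, h5, e6, if_true, Bool.false_eq_true, if_false]
    apply PySem.Dict.ext
    rw [PySem.Dict.items_insert_of_contains]
    · simp
    · simp [PySem.Dict.contains_mk]
  by_cases h6 : PySem.Str.startswith line "Preventive Measures:"
  · simp only [pdStepA, h1, h2, h3, h4, h5, h6, if_true, Bool.false_eq_true, if_false]
    apply PySem.Dict.ext
    rw [PySem.Dict.items_insert_of_contains]
    · simp
    · simp [PySem.Dict.contains_mk]
  · simp only [pdStepA, if_neg h1, if_neg h2, if_neg h3, if_neg h4, if_neg h5, if_neg h6]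

-- the loop invariant: A's fold keeps, per field, the forward "last match so far" accumulator
theorem pd_inv (lines : List String) : ∀ (v1 v2 v3 v4 v5 v6 : String),
    lines.foldl pdStepA (PySem.Dict.mk [("name", v1), ("prevalence", v2), ("risk_factors", v3),
        ("symptoms", v4), ("treatments", v5), ("preventive_measures", v6)]) =
    PySem.Dict.mk
      [("name", pdAcc "Disease Name:" v1 lines),
       ("prevalence", pdAcc "Prevalence:" v2 lines),
       ("risk_factors", pdAcc "Risk Factors:" v3 lines),
       ("symptoms", pdAcc "Symptoms:" v4 lines),
       ("treatments", pdAcc "Treatments:" v5 lines),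
       ("preventive_measures", pdAcc "Preventive Measures:" v6 lines)] := by
  induction lines with
  | nil => intro v1 v2 v3 v4 v5 v6; rfl
  | cons x xs ih =>
      intro v1 v2 v3 v4 v5 v6
      rw [List.foldl_cons, pd_step, ih]
      rfl

-- ===== VERDICT (by name: the statement is the Claim_ definition above) =====
-- the whole equality, for an arbitrary list of lines
theorem pd_main (lines : List String) :
    (lines.foldl pdStepA (PySem.Dict.ofList
      [("name", ""), ("prevalence", ""), ("risk_factors", ""), ("symptoms", ""),
       ("treatments", ""), ("preventive_measures", "")])).items =
    pdFields.map (fun kp => (kp.1, pdLast lines kp.2)) := by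
  have hof : PySem.Dict.ofList
      [("name", ""), ("prevalence", ""), ("risk_factors", ""), ("symptoms", ""),
       ("treatments", ""), ("preventive_measures", "")] =
      PySem.Dict.mk [("name", ""), ("prevalence", ""), ("risk_factors", ""), ("symptoms", ""),
       ("treatments", ""), ("preventive_measures", "")] := by decide
  have hl : ∀ p, pdAcc p "" lines = pdLast lines p := by
    intro p; rw [pd_acc_eq_last, pdLast]
  rw [hof, pd_inv]
  simp only [pdFields, List.map]
  rw [hl, hl, hl, hl, hl, hl]

theorem parse_disease_document_spec : Claim_equal_parse_disease_document := by
  intro doc _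
  exact pd_main ((PySem.Str.split? doc "\n").getD [])
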